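-- pv_equiv track=rewrite | github.com/udinilya/algopracticum | 5_алгоритмы_(дерево_поиска)/09_разность_индексов .py | solution
-- ===== SOURCE A (Python) =====
-- k = 3
--
-- def solution(values):
--     douplicate_values = values
--     diffs = []
--     for idx, i in enumerate(values):
--         for id, j in enumerate(douplicate_values):
--             if idx != id and idx < id:
--                 diffs.append(abs(i-j))
--
--     diffs.sort()
--     return diffs[k-1]
-- ===== SOURCE B (Python) =====
-- k = 3
--
-- def solution(values):
--     # Keep only the k smallest pairwise differences in a tiny sorted buffer;
--     # no O(n^2)-element list is built and no O(n^2 log n) sort is done.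
--     best = []
--     rest = values
--     while rest:
--         x = rest[0]
--         rest = rest[1:]
--         for y in rest:
--             d = abs(x - y)
--             i = 0
--             while i < len(best) and best[i] <= d:
--                 i += 1
--             best.insert(i, d)
--             if len(best) > k:
--                 best.pop()
--     return best[k - 1]
-- ===== Notes on version B (the rewrite author's own statement) =====
-- stated objective: faster
-- what changed: B never materialises or sorts the O(n^2) list of all pairwise differences: it streams the differences through a sorted buffer of at most k=3 elements (insert into the buffer, drop the largest when it exceeds 3) and returns the buffer's last element.
import Mathlib
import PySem

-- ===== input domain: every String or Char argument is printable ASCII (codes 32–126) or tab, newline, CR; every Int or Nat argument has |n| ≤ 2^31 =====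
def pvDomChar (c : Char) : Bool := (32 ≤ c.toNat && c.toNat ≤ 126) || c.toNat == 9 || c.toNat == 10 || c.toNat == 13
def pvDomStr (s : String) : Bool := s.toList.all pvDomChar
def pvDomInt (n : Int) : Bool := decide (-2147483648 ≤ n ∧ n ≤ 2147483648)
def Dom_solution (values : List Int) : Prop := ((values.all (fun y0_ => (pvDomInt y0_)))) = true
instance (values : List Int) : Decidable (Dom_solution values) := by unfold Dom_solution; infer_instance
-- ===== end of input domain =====

-- B keeps only the k=3 smallest pairwise differences in a tiny sorted buffer instead of
-- building and fully sorting the O(n^2) list of all differences (constant-factor faster).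

-- ===== PORT A =====
def k : Int := 3

def solution (values : List Int) : Int :=
  let diffs : List Int :=
    (PySem.List.enumerate values 0).foldl
      (fun diffs p =>
        (PySem.List.enumerate values 0).foldl
          (fun diffs q =>
            if p.1 ≠ q.1 ∧ p.1 < q.1 then diffs ++ [|p.2 - q.2|] else diffs)
          diffs)
      []
  let ds := PySem.List.sorted diffs (fun x => x) false
  (PySem.List.pyGet? ds (k - 1)).getD 0

-- ===== PORT B =====
-- the while-loop 'i = 0; while i < len(best) and best[i] <= d: …; best.insert(i, d)'
def insortB : List Int → Int → List Int
  | [], d => [d]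
  | h :: t, d => if h ≤ d then h :: insortB t d else d :: h :: t

-- one inner-loop body: insert d, then 'if len(best) > k: best.pop()'
def stepB (b : List Int) (d : Int) : List Int :=
  let b' := insortB b d
  if 3 < b'.length then b'.dropLast else b'

-- the 'while rest:' loop
def goB : List Int → List Int → List Int
  | best, [] => best
  | best, x :: rest => goB (rest.foldl (fun b y => stepB b |x - y|) best) rest

def solution_alt (values : List Int) : Int :=
  (PySem.List.pyGet? (goB [] values) (k - 1)).getD 0

-- ===== PRECONDITION & SPEC =====
-- Pre_: with fewer than 3 values there are fewer than 3 pairwise differences and both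
-- Pythons raise IndexError on the final index.
def Pre_solution (values : List Int) : Prop := 3 ≤ values.length
instance (values : List Int) : Decidable (Pre_solution values) := by unfold Pre_solution; infer_instance

def pvWitness_solution : List Int := [5, -2, 9]

def Spec_solution (values : List Int) (out : Int) : Prop := out = solution_alt values
instance (values : List Int) (out : Int) : Decidable (Spec_solution values out) := by unfold Spec_solution; infer_instance

-- ===== CLAIM (what is proved, stated in full; the proofs are below) =====
def Claim_equal_solution : Prop := ∀ (values : List Int), Dom_solution values → Pre_solution values → Spec_solution values (solution values)

-- ===== LEMMAS AND PROOFS =====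

-- the list of differences both programs enumerate, pair by pair
def diffsOf : List Int → List Int
  | [] => []
  | x :: rest => rest.map (fun y => |x - y|) ++ diffsOf rest

-- full insertion sort by repeated insortB (proof-side reference object)
def sortAll (l : List Int) : List Int := l.foldl insortB []

theorem insortB_perm (s : List Int) (d : Int) : (insortB s d).Perm (d :: s) := by
  induction s with
  | nil => simp [insortB]
  | cons h t ih =>
    simp only [insortB]
    split
    · exact ((ih.cons h).trans (List.Perm.swap d h t))
    · exact List.Perm.refl _

theorem insortB_sorted (s : List Int) (d : Int) (hs : s.Pairwise (· ≤ ·)) :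
    (insortB s d).Pairwise (· ≤ ·) := by
  induction s with
  | nil => simp [insortB]
  | cons h t ih =>
    simp only [insortB]
    rcases List.pairwise_cons.mp hs with ⟨hht, ht⟩
    split
    · rename_i hhd
      refine List.pairwise_cons.mpr ⟨?_, ih ht⟩
      intro y hy
      rcases List.mem_cons.mp ((insortB_perm t d).mem_iff.mp hy) with h1 | h1
      · omega
      · exact hht y h1
    · rename_i hhd
      refine List.pairwise_cons.mpr ⟨?_, hs⟩
      intro y hy
      rcases List.mem_cons.mp hy with h1 | h1
      · omega
      · have := hht y h1; omega

theorem foldl_insortB_perm (l : List Int) : ∀ s : List Int, (l.foldl insortB s).Perm (s ++ l) := by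
  induction l with
  | nil => intro s; simp
  | cons d l ih =>
    intro s
    have h1 := ih (insortB s d)
    have h2 : (insortB s d ++ l).Perm (s ++ d :: l) := by
      refine ((insortB_perm s d).append_right l).trans ?_
      exact (List.perm_middle).symm
    exact (List.foldl_cons .. ▸ h1).trans h2

theorem foldl_insortB_sorted (l : List Int) :
    ∀ s : List Int, s.Pairwise (· ≤ ·) → (l.foldl insortB s).Pairwise (· ≤ ·) := by
  induction l with
  | nil => intro s hs; simpa using hs
  | cons d l ih => intro s hs; exact ih _ (insortB_sorted s d hs)

-- truncated insertion = insertion into the full sorted list, truncated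
theorem stepB_take (s : List Int) (d : Int) :
    ∀ n : Nat, (let b' := insortB (s.take n) d;
      if n < b'.length then b'.dropLast else b') = (insortB s d).take n := by
  induction s with
  | nil =>
    intro n
    cases n with
    | zero => simp [insortB]
    | succ m => simp [insortB]
  | cons h t ih =>
    intro n
    cases n with
    | zero => simp [insortB]
    | succ m =>
      simp only [List.take_succ_cons, insortB]
      by_cases hhd : h ≤ d
      · simp only [if_pos hhd]
        have ihm := ih m
        simp only [] at ihm
        have hne : insortB (t.take m) d ≠ [] := by
          cases t.take m with
          | nil => simp [insortB]
          | cons a b => simp only [insortB]; split <;> simp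
        by_cases hlen : m < (insortB (t.take m) d).length
        · have : m + 1 < (h :: insortB (t.take m) d).length := by simp; omega
          simp only [if_pos this, if_pos hlen] at *
          rw [List.dropLast_cons_of_ne_nil hne]
          rw [ihm]
          rfl
        · have : ¬ (m + 1 < (h :: insortB (t.take m) d).length) := by simp at hlen ⊢; omega
          rw [if_neg this]
          rw [if_neg hlen] at ihm
          rw [ihm]
          rfl
      · simp only [if_neg hhd]
        -- insortB gives d :: h :: t.take m on the left, d :: h :: t on the right
        by_cases hlen : m + 1 < (d :: h :: t.take m).length
        · have hlt : m ≤ t.length := by simp at hlen; omega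
          rw [if_pos hlen]
          have hlen' : (d :: h :: t.take m).length = m + 2 := by simp; omega
          rw [List.dropLast_eq_take, hlen']
          simp only [show m + 2 - 1 = m + 1 from rfl, List.take_succ_cons]
          congr 1
          cases m with
          | zero => simp
          | succ j =>
            simp only [List.take_succ_cons, List.take_take]
            congr 2
            omega
        · have hlt : t.length < m := by simp at hlen; omega
          rw [if_neg hlen]
          simp only [List.take_succ_cons]
          rw [List.take_of_length_le (by omega), List.take_of_length_le (by simp; omega)]

-- the k-smallest buffer computes take 3 of the fully sorted list
theorem foldl_stepB_take (l : List Int) :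
    ∀ s : List Int, l.foldl stepB (s.take 3) = (l.foldl insortB s).take 3 := by
  induction l with
  | nil => intro s; rfl
  | cons d l ih =>
    intro s
    simp only [List.foldl_cons]
    rw [show stepB (s.take 3) d = (insortB s d).take 3 from stepB_take s d 3]
    exact ih (insortB s d)

-- goB consumes exactly the difference list diffsOf
theorem goB_eq_foldl (l : List Int) :
    ∀ best : List Int, goB best l = (diffsOf l).foldl stepB best := by
  induction l with
  | nil => intro best; rfl
  | cons x rest ih =>
    intro best
    simp only [goB, diffsOf, List.foldl_append, ih, List.foldl_map]

-- enumerate-filter helpers for A's inner loop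
theorem filter_enumerate_kill (xs : List Int) :
    ∀ (s t : Int), s + xs.length ≤ t + 1 →
      (PySem.List.enumerate xs s).filter (fun q => decide (t < q.1)) = [] := by
  induction xs with
  | nil => intro s t _; simp [PySem.List.enumerate_nil]
  | cons x xs ih =>
    intro s t h
    simp only [PySem.List.enumerate_cons, List.filter_cons]
    have h1 : ¬ (t < s) := by simp at h; omega
    simp only [decide_eq_true_eq, h1, if_false]
    exact ih (s + 1) t (by simp at h ⊢; omega)

theorem filter_enumerate_keep (xs : List Int) :
    ∀ (s t : Int), t < s →
      (PySem.List.enumerate xs s).filter (fun q => decide (t < q.1)) = PySem.List.enumerate xs s := by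
  induction xs with
  | nil => intro s t _; simp [PySem.List.enumerate_nil]
  | cons x xs ih =>
    intro s t h
    simp only [PySem.List.enumerate_cons, List.filter_cons]
    simp only [decide_eq_true_eq, h, if_true]
    rw [ih (s + 1) t (by omega)]

-- A's inner loop over the whole enumerate, for a row index m, appends the row of drop (m+1)
theorem inner_loop_eq (xs : List Int) (m : Nat) (x : Int) (d : List Int) :
    (PySem.List.enumerate xs 0).foldl
      (fun d q => if (m : Int) ≠ q.1 ∧ (m : Int) < q.1 then d ++ [|x - q.2|] else d) d
      = d ++ (xs.drop (m + 1)).map (fun y => |x - y|) := by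
  have hsplit : xs = xs.take (m + 1) ++ xs.drop (m + 1) := (List.take_append_drop _ _).symm
  have hfun : (fun (d : List Int) (q : Int × Int) =>
      if (m : Int) ≠ q.1 ∧ (m : Int) < q.1 then d ++ [|x - q.2|] else d)
      = fun d q => if (decide ((m : Int) < q.1)) = true then d ++ [(fun p => |x - p.2|) q] else d := by
    funext d q
    by_cases h : (m : Int) < q.1
    · have : (m : Int) ≠ q.1 := by omega
      simp [h, this]
    · simp [h]
  rw [hfun, PySem.List.foldl_append_if]
  congr 1
  by_cases hm : m + 1 ≤ xs.length
  · conv_lhs => rw [hsplit]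
    rw [PySem.List.enumerate_append, List.filter_append]
    rw [filter_enumerate_kill (xs.take (m+1)) 0 m (by simp)]
    rw [filter_enumerate_keep (xs.drop (m+1)) (0 + (xs.take (m+1)).length) m
        (by simp; omega)]
    simp only [List.nil_append]
    conv_rhs => rw [← PySem.List.map_snd_enumerate (xs.drop (m+1)) (0 + ((xs.take (m+1)).length : Int))]
    rw [List.map_map]
    rfl
  · have hd : xs.drop (m+1) = [] := List.drop_eq_nil_of_le (by omega)
    rw [filter_enumerate_kill xs 0 m (by simp; omega), hd]
    simp

-- every index in enumerate xs s (s a natural) is a natural number cast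
theorem enumerate_fst_nat (xs : List Int) :
    ∀ (s : Nat) (p : Int × Int), p ∈ PySem.List.enumerate xs (s : Int) → ∃ m : Nat, p.1 = (m : Int) := by
  induction xs with
  | nil => intro s p h; simp [PySem.List.enumerate_nil] at h
  | cons x xs ih =>
    intro s p h
    rw [PySem.List.enumerate_cons] at h
    rcases List.mem_cons.mp h with h | h
    · exact ⟨s, by simp [h]⟩
    · have hc : ((s : Int) + 1) = ((s + 1 : Nat) : Int) := by push_cast; ring
      rw [hc] at h
      exact ih (s + 1) p h

-- A's double loop builds exactly diffsOf values
theorem flatMap_enumerate_diffs (xs : List Int) :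
    ∀ (s : Nat) (u : List Int), u.drop s = xs →
      (PySem.List.enumerate xs (s : Int)).flatMap
        (fun p => (u.drop (p.1.toNat + 1)).map (fun y => |p.2 - y|)) = diffsOf xs := by
  induction xs with
  | nil => intro s u _; simp [PySem.List.enumerate_nil, diffsOf]
  | cons x t ih =>
    intro s u hu
    rw [PySem.List.enumerate_cons, List.flatMap_cons]
    have hdrop : u.drop (s + 1) = t := by
      have h1 := congrArg (List.drop 1) hu
      rw [List.drop_drop] at h1
      simpa [Nat.add_comm] using h1
    have h1 : ((s : Int)).toNat + 1 = s + 1 := by omega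
    rw [show ((s : Int), x).1 = (s : Int) from rfl]
    simp only [h1, hdrop]
    have h2 : ((s : Int) + 1) = ((s + 1 : Nat) : Int) := by push_cast; ring
    rw [h2, ih (s + 1) u hdrop]
    rfl

theorem outer_loop_eq (values : List Int) :
    (PySem.List.enumerate values 0).foldl
      (fun diffs p =>
        (PySem.List.enumerate values 0).foldl
          (fun diffs q =>
            if p.1 ≠ q.1 ∧ p.1 < q.1 then diffs ++ [|p.2 - q.2|] else diffs)
          diffs)
      [] = diffsOf values := by
  have hcong : (PySem.List.enumerate values 0).foldl
      (fun diffs p =>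
        (PySem.List.enumerate values 0).foldl
          (fun diffs q =>
            if p.1 ≠ q.1 ∧ p.1 < q.1 then diffs ++ [|p.2 - q.2|] else diffs)
          diffs)
      [] = (PySem.List.enumerate values 0).foldl
      (fun diffs p => diffs ++ (values.drop (p.1.toNat + 1)).map (fun y => |p.2 - y|)) [] := by
    apply PySem.List.foldl_congr_mem
    intro acc p hp
    rcases enumerate_fst_nat values 0 p (by exact_mod_cast hp) with ⟨m, hm⟩
    have : p.1.toNat = m := by omega
    rw [this]
    have := inner_loop_eq values m p.2 acc
    rw [← this]
    apply PySem.List.foldl_congr_mem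
    intro d q _
    rw [hm]
  rw [hcong, PySem.List.foldl_append_eq_flatMap, List.nil_append]
  exact flatMap_enumerate_diffs values 0 values rfl

-- A's sorted difference list is sortAll of it
theorem sorted_eq_sortAll (l : List Int) :
    PySem.List.sorted l (fun x => x) false = sortAll l := by
  apply PySem.List.sorted_id_eq_of_perm_of_pairwise
  · simpa using foldl_insortB_perm l []
  · exact foldl_insortB_sorted l [] (by simp)

-- ===== VERDICT (by name: the statement is the Claim_ definition above) =====
theorem solution_spec : Claim_equal_solution := by
  intro values _ _
  unfold Spec_solution solution solution_alt
  simp only [outer_loop_eq, sorted_eq_sortAll, goB_eq_foldl]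
  have h3 : (diffsOf values).foldl stepB [] = (sortAll (diffsOf values)).take 3 := by
    have := foldl_stepB_take (diffsOf values) []
    simpa [sortAll] using this
  rw [h3]
  have hk : k - 1 = ((2 : Nat) : Int) := by decide
  rw [hk, PySem.List.pyGet?_natCast, PySem.List.pyGet?_natCast]
  rw [List.getElem?_take]
  simp
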